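-- pv_equiv track=rewrite | github.com/copernicus99/Tile_Solver_Thingy | solver/orchestrator.py | _render_mask_from_notches
-- ===== SOURCE A (Python) =====
-- from typing import Callable, Dict, Iterable, List, Optional, Sequence, Set, Tuple
--
-- def _render_mask_from_notches(
--     width: int, height: int, notches: Sequence[Tuple[str, int, int, int]]
-- ) -> Optional[Tuple[Tuple[Tuple[bool, ...], ...], int]]:
--     mask = [[True for _ in range(width)] for _ in range(height)]
--     removed = 0
--     for orientation, depth, length, start in notches:
--         if orientation in ("top", "bottom"):
--             if depth > height or length > width:
--                 return None
--             if start < 0 or start + length > width: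
--                 return None
--             for offset in range(depth):
--                 row_idx = offset if orientation == "top" else height - 1 - offset
--                 for col in range(length):
--                     col_idx = start + col
--                     if not mask[row_idx][col_idx]:
--                         return None
--                     mask[row_idx][col_idx] = False
--                     removed += 1
--         else:
--             if depth > width or length > height:
--                 return None
--             if start < 0 or start + length > height:
--                 return None
--             for offset in range(depth):
--                 col_idx = offset if orientation == "left" else width - 1 - offset
--                 for row in range(length):
--                     row_idx = start + row
--                     if not mask[row_idx][col_idx]:
--                         return None
--                     mask[row_idx][col_idx] = False
--                     removed += 1
--     return tuple(tuple(row) for row in mask), removed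
-- ===== SOURCE B (Python) =====
-- def _rect_of(width, height, orientation, depth, length, start):
--     """Half-open rectangle (r0, r1, c0, c1) covered by the notch, or None on a bounds failure."""
--     if orientation in ("top", "bottom"):
--         if depth > height or length > width:
--             return None
--         if start < 0 or start + length > width:
--             return None
--         if orientation == "top":
--             return (0, depth, start, start + length)
--         return (height - depth, height, start, start + length)
--     if depth > width or length > height:
--         return None
--     if start < 0 or start + length > height:
--         return None
--     if orientation == "left":
--         return (start, start + length, 0, depth)
--     return (start, start + length, width - depth, width)
--
--
-- def _render_mask_from_notches(width, height, notches):
--     rects = []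
--     for orientation, depth, length, start in notches:
--         rect = _rect_of(width, height, orientation, depth, length, start)
--         if rect is None:
--             return None
--         r0, r1, c0, c1 = rect
--         if any(max(r0, q0) < min(r1, q1) and max(c0, p0) < min(c1, p1)
--                for q0, q1, p0, p1 in rects):
--             return None
--         rects.append(rect)
--     all_true = (True,) * width
--     rows = []
--     for r in range(height):
--         cover = [(c0, c1) for r0, r1, c0, c1 in rects if r0 <= r < r1]
--         if not cover:
--             rows.append(all_true)
--         else:
--             row = [True] * width
--             for c0, c1 in cover:
--                 if c0 < c1:
--                     row[c0:c1] = (False,) * (c1 - c0)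
--             rows.append(tuple(row))
--     removed = sum(max(r1 - r0, 0) * max(c1 - c0, 0) for r0, r1, c0, c1 in rects)
--     return tuple(rows), removed
-- ===== Notes on version B (the rewrite author's own statement) =====
-- stated objective: faster
-- what changed: B never touches individual cells while scanning notches: each notch is reduced to a half-open rectangle, overlap is detected by interval arithmetic (rectangle intersection) against the earlier rectangles, the removed count is the sum of rectangle areas, and the mask is rendered row-wise at the end, sharing one all-True row for uncovered rows and painting column intervals by slice assignment on covered rows.
import Mathlib
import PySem

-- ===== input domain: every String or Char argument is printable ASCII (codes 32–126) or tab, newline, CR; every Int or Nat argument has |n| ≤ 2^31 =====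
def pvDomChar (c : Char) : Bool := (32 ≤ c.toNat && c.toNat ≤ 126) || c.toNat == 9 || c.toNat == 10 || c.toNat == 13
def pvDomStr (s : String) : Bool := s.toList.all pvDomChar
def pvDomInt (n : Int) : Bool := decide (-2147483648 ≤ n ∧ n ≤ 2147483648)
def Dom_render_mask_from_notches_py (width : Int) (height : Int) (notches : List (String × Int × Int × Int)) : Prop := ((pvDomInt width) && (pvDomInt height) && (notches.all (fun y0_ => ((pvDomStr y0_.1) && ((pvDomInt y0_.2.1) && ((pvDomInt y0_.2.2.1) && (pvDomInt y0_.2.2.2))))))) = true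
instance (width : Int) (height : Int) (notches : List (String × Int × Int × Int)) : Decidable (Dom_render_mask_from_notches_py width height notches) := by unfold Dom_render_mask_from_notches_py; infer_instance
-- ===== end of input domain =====

-- B abandons per-cell marking: each notch becomes a half-open rectangle, overlap is detected
-- by interval arithmetic between rectangles, the count is a sum of areas, and the mask is
-- rendered row-wise at the end, sharing one all-True row for uncovered rows ('faster' objective).

-- ===== PORT A =====
-- one inner-loop body of A: read mask[r][c]; on False return None, else clear it and count.
-- The indices r, c are always in range when this is reached (guaranteed by the preceding
-- bounds checks), so pyGetD/pySetD model Python's mask[r][c] read/write exactly here.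
def pvCellA (st : Option (List (List Bool) × Int)) (r c : Int) :
    Option (List (List Bool) × Int) :=
  match st with
  | none => none
  | some (mask, removed) =>
    let row := PySem.List.pyGetD mask r []
    if !(PySem.List.pyGetD row c true) then none
    else some (PySem.List.pySetD mask r (PySem.List.pySetD row c false), removed + 1)

-- one iteration of A's loop over notches (None propagates A's early 'return None')
def pvNotchA (width height : Int) (st : Option (List (List Bool) × Int))
    (n : String × Int × Int × Int) : Option (List (List Bool) × Int) :=
  match st with
  | none => none
  | some st' =>
    match n with
    | (orientation, depth, length, start) =>
      if orientation == "top" || orientation == "bottom" then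
        if depth > height || length > width then none
        else if start < 0 || start + length > width then none
        else (PySem.List.pyRange 0 depth 1).foldl (fun acc offset =>
          (PySem.List.pyRange 0 length 1).foldl (fun acc2 col =>
            pvCellA acc2 (if orientation == "top" then offset else height - 1 - offset)
              (start + col)) acc) (some st')
      else
        if depth > width || length > height then none
        else if start < 0 || start + length > height then none
        else (PySem.List.pyRange 0 depth 1).foldl (fun acc offset =>
          (PySem.List.pyRange 0 length 1).foldl (fun acc2 row =>
            pvCellA acc2 (start + row)
              (if orientation == "left" then offset else width - 1 - offset)) acc) (some st')

def render_mask_from_notches_py (width : Int) (height : Int)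
    (notches : List (String × Int × Int × Int)) : Option (List (List Bool) × Int) :=
  let mask := (PySem.List.pyRange 0 height 1).map (fun _ =>
    (PySem.List.pyRange 0 width 1).map (fun _ => true))
  match notches.foldl (pvNotchA width height) (some (mask, 0)) with
  | none => none
  | some (mask, removed) => some (mask, removed)   -- tuple(tuple(row) …) is the identity here

-- ===== PORT B =====
-- Source B's _rect_of: the half-open rectangle (r0, r1, c0, c1) of a notch, none on bounds failure
def pvRectOf (width height : Int) (orientation : String) (depth length start : Int) :
    Option (Int × Int × Int × Int) :=
  if orientation == "top" || orientation == "bottom" then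
    if depth > height || length > width then none
    else if start < 0 || start + length > width then none
    else if orientation == "top" then some (0, depth, start, start + length)
    else some (height - depth, height, start, start + length)
  else
    if depth > width || length > height then none
    else if start < 0 || start + length > height then none
    else if orientation == "left" then some (start, start + length, 0, depth)
    else some (start, start + length, width - depth, width)

-- the rectangle-intersection test of Source B's 'any(...)'
def pvIntersects (a b : Int × Int × Int × Int) : Bool :=
  decide (max a.1 b.1 < min a.2.1 b.2.1) && decide (max a.2.2.1 b.2.2.1 < min a.2.2.2 b.2.2.2)

-- one iteration of B's loop over notches
def pvNotchB (width height : Int) (st : Option (List (Int × Int × Int × Int)))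
    (n : String × Int × Int × Int) : Option (List (Int × Int × Int × Int)) :=
  match st with
  | none => none
  | some rects =>
    match n with
    | (orientation, depth, length, start) =>
      match pvRectOf width height orientation depth length start with
      | none => none
      | some rect =>
        if rects.any (fun q => pvIntersects rect q) then none
        else some (rects ++ [rect])

-- Source B's guarded slice assignment row[c0:c1] = (False,)*(c1-c0); exact here because the
-- guard ensures c0 < c1 and validated rectangles give 0 ≤ c0 and c1 ≤ len(row) (no wrap)
def pvApplyIv (row : List Bool) (iv : Int × Int) : List Bool :=
  if iv.1 < iv.2 then
    row.take iv.1.toNat ++ List.replicate (iv.2 - iv.1).toNat false ++ row.drop iv.2.toNat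
  else row

-- one row of Source B's final render: the shared all-True row unless some rectangle covers row r,
-- else paint each covering rectangle's column interval onto an all-True row
def pvRowB (width : Int) (rects : List (Int × Int × Int × Int)) (r : Int) : List Bool :=
  let cover := (rects.filter fun q => decide (q.1 ≤ r ∧ r < q.2.1)).map fun q => (q.2.2.1, q.2.2.2)
  if cover.isEmpty then List.replicate width.toNat true
  else cover.foldl pvApplyIv (List.replicate width.toNat true)

def render_mask_from_notches_py_alt (width : Int) (height : Int)
    (notches : List (String × Int × Int × Int)) : Option (List (List Bool) × Int) :=
  match notches.foldl (pvNotchB width height) (some []) with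
  | none => none
  | some rects =>
    some ((PySem.List.pyRange 0 height 1).map (fun r => pvRowB width rects r),
      (rects.map fun q => max (q.2.1 - q.1) 0 * max (q.2.2.2 - q.2.2.1) 0).sum)

-- ===== PRECONDITION & SPEC =====
def Spec_render_mask_from_notches_py (width : Int) (height : Int) (notches : List (String × Int × Int × Int)) (out : Option (List (List Bool) × Int)) : Prop := out = render_mask_from_notches_py_alt width height notches
instance (width : Int) (height : Int) (notches : List (String × Int × Int × Int)) (out : Option (List (List Bool) × Int)) : Decidable (Spec_render_mask_from_notches_py width height notches out) := by unfold Spec_render_mask_from_notches_py; infer_instance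

-- ===== CLAIM (what is proved, stated in full; the proofs are below) =====
def Claim_equal_render_mask_from_notches_py : Prop := ∀ (width : Int) (height : Int) (notches : List (String × Int × Int × Int)), Dom_render_mask_from_notches_py width height notches → Spec_render_mask_from_notches_py width height notches (render_mask_from_notches_py width height notches)

-- ===== LEMMAS AND PROOFS =====

-- the mask determined by a list of removed coordinates: cell (r,c) is True iff not removed
def pvMaskOf (width height : Int) (s : List (Int × Int)) : List (List Bool) :=
  (PySem.List.pyRange 0 height 1).map fun r =>
    (PySem.List.pyRange 0 width 1).map fun c => !(s.contains (r, c))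

-- a coordinate in range of the grid
def pvInR (width height : Int) (p : Int × Int) : Prop :=
  0 ≤ p.1 ∧ p.1 < height ∧ 0 ≤ p.2 ∧ p.2 < width

-- rectangle membership and the cell lists of rectangles
def pvInRect (q : Int × Int × Int × Int) (p : Int × Int) : Prop :=
  q.1 ≤ p.1 ∧ p.1 < q.2.1 ∧ q.2.2.1 ≤ p.2 ∧ p.2 < q.2.2.2

def pvCellsOf (q : Int × Int × Int × Int) : List (Int × Int) :=
  (PySem.List.pyRange q.1 q.2.1 1).flatMap fun r =>
    (PySem.List.pyRange q.2.2.1 q.2.2.2 1).map fun c => (r, c)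

def pvCells (rects : List (Int × Int × Int × Int)) : List (Int × Int) :=
  rects.flatMap pvCellsOf

-- A's traversal order of the cells of a top/bottom notch
def pvCellsTB (orientation : String) (height depth length start : Int) : List (Int × Int) :=
  (PySem.List.pyRange 0 depth 1).flatMap fun offset =>
    (PySem.List.pyRange 0 length 1).map fun col =>
      ((if orientation == "top" then offset else height - 1 - offset), start + col)

-- A's traversal order of the cells of a left/right notch
def pvCellsLR (orientation : String) (width depth length start : Int) : List (Int × Int) :=
  (PySem.List.pyRange 0 depth 1).flatMap fun offset =>
    (PySem.List.pyRange 0 length 1).map fun row =>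
      (start + row, (if orientation == "left" then offset else width - 1 - offset))

lemma pvMaskOf_nil (w h : Int) :
    pvMaskOf w h [] =
      (PySem.List.pyRange 0 h 1).map (fun _ => (PySem.List.pyRange 0 w 1).map (fun _ => true)) := by
  simp [pvMaskOf]

lemma pvMaskOf_congr (w h : Int) (s t : List (Int × Int)) (hm : ∀ p, p ∈ s ↔ p ∈ t) :
    pvMaskOf w h s = pvMaskOf w h t := by
  unfold pvMaskOf
  apply List.map_congr_left
  intro r _
  apply List.map_congr_left
  intro c _
  simp [List.contains_eq_mem, hm]

lemma pvMask_set (w h r c : Int) (s : List (Int × Int))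
    (hr : 0 ≤ r) (_hr2 : r < h) (hc : 0 ≤ c) (_hc2 : c < w) :
    PySem.List.pySetD (pvMaskOf w h s) r
      (PySem.List.pySetD ((PySem.List.pyRange 0 w 1).map fun c' => !(s.contains (r, c'))) c false)
      = pvMaskOf w h (s ++ [(r, c)]) := by
  rw [PySem.List.pySetD_of_nonneg _ _ hr, PySem.List.pySetD_of_nonneg _ _ hc]
  apply List.ext_getElem
  · simp [pvMaskOf]
  intro k hk1 hk2
  rw [List.getElem_set]
  have hkh : (k : Int) < h := by
    have := hk2
    simp [pvMaskOf, PySem.List.length_pyRange_one] at this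
    omega
  by_cases hrk : r.toNat = k
  · rw [if_pos hrk]
    have hkr : (k : Int) = r := by omega
    simp only [pvMaskOf, List.getElem_map, PySem.List.getElem_pyRange_one, zero_add, hkr]
    apply List.ext_getElem
    · simp
    intro j hj1 hj2
    have hjw : (j : Int) < w := by
      have := hj2
      simp [PySem.List.length_pyRange_one] at this
      omega
    rw [List.getElem_set]
    by_cases hcj : c.toNat = j
    · have hjc : (j : Int) = c := by omega
      simp [hcj, List.getElem_map, PySem.List.getElem_pyRange_one, hjc, List.contains_eq_mem]
    · have hjc : ¬ ((j : Int)) = c := by omega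
      have hne : ¬ ((r, (j : Int)) = (r, c)) := by simp [Prod.ext_iff]; omega
      simp only [List.getElem_map, PySem.List.getElem_pyRange_one, zero_add, if_neg hcj,
        List.contains_eq_mem, List.mem_append, List.mem_singleton]
      simp [hne]
  · rw [if_neg hrk]
    have hkr : ¬ ((k : Int)) = r := by omega
    simp only [pvMaskOf, List.getElem_map, PySem.List.getElem_pyRange_one, zero_add]
    apply List.map_congr_left
    intro c' _
    have hne : ¬ (((k : Int), c') = (r, c)) := by
      simp [Prod.ext_iff]
      intro he
      exact absurd he hkr
    simp [List.contains_eq_mem, hne]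

lemma pvCellA_some (w h r c : Int) (s : List (Int × Int)) (n : Int)
    (hr : 0 ≤ r) (hr2 : r < h) (hc : 0 ≤ c) (hc2 : c < w) :
    pvCellA (some (pvMaskOf w h s, n)) r c =
      if s.contains (r, c) then none
      else some (pvMaskOf w h (s ++ [(r, c)]), n + 1) := by
  have h1 : PySem.List.pyGetD (pvMaskOf w h s) r ([] : List Bool)
      = (PySem.List.pyRange 0 w 1).map (fun c' => !(s.contains (r, c'))) :=
    PySem.List.pyGetD_map_pyRange_of_nonneg _ h r _ hr hr2
  have h2 : PySem.List.pyGetD ((PySem.List.pyRange 0 w 1).map (fun c' => !(s.contains (r, c')))) c true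
      = !(s.contains (r, c)) :=
    PySem.List.pyGetD_map_pyRange_of_nonneg _ w c _ hc hc2
  by_cases hmem : s.contains (r, c)
  · simp only [pvCellA, h1, h2, Bool.not_not, hmem, if_true]
  · simp only [pvCellA, h1, h2, Bool.not_not, hmem, Bool.false_eq_true, if_false]
    rw [pvMask_set w h r c s hr hr2 hc hc2]

lemma pvFold_cells_none (L : List (Int × Int)) :
    L.foldl (fun acc p => pvCellA acc p.1 p.2) none = none := by
  induction L with
  | nil => rfl
  | cons p L ih => simpa [pvCellA] using ih

lemma pvFold_cells (w h : Int) (L : List (Int × Int)) (s : List (Int × Int))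
    (hs : s.Nodup) (hL : ∀ p ∈ L, pvInR w h p) :
    L.foldl (fun acc p => pvCellA acc p.1 p.2) (some (pvMaskOf w h s, (s.length : Int))) =
      if (s ++ L).Nodup then some (pvMaskOf w h (s ++ L), ((s ++ L).length : Int)) else none := by
  induction L generalizing s with
  | nil => simp [hs]
  | cons p L ih =>
    have hp := hL p List.mem_cons_self
    simp only [List.foldl_cons]
    rw [pvCellA_some w h p.1 p.2 s _ hp.1 hp.2.1 hp.2.2.1 hp.2.2.2]
    by_cases hmem : s.contains (p.1, p.2)
    · rw [if_pos hmem, pvFold_cells_none]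
      have hpm : p ∈ s := by simpa [List.contains_eq_mem] using hmem
      have : ¬ (s ++ p :: L).Nodup := by
        intro hnd
        rw [List.nodup_append] at hnd
        exact hnd.2.2 p hpm p List.mem_cons_self rfl
      rw [if_neg this]
    · rw [if_neg hmem]
      have hpm : p ∉ s := by simpa [List.contains_eq_mem] using hmem
      have hnd1 : (s ++ [p]).Nodup := by
        rw [List.nodup_append]
        refine ⟨hs, List.nodup_singleton _, ?_⟩
        intro a ha b hb
        simp at hb
        subst hb
        intro he
        exact hpm (he ▸ ha)
      have hih := ih (s ++ [p]) hnd1 (fun q hq => hL q (List.mem_cons_of_mem _ hq))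
      simp only [Prod.mk.eta] at *
      rw [show (s.length : Int) + 1 = (((s ++ [p]).length : Nat) : Int) by simp]
      rw [hih, ← List.append_cons]

lemma mem_pvCellsOf (q : Int × Int × Int × Int) (p : Int × Int) :
    p ∈ pvCellsOf q ↔ pvInRect q p := by
  simp only [pvCellsOf, List.mem_flatMap, List.mem_map, PySem.List.mem_pyRange_one, pvInRect]
  constructor
  · rintro ⟨r, hr, c, hc, rfl⟩
    exact ⟨hr.1, hr.2, hc.1, hc.2⟩
  · rintro ⟨h1, h2, h3, h4⟩
    exact ⟨p.1, ⟨h1, h2⟩, p.2, ⟨h3, h4⟩, rfl⟩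

lemma mem_pvCells (rects : List (Int × Int × Int × Int)) (p : Int × Int) :
    p ∈ pvCells rects ↔ ∃ q ∈ rects, pvInRect q p := by
  simp only [pvCells, List.mem_flatMap, mem_pvCellsOf]

lemma pvCellsOf_nodup (q : Int × Int × Int × Int) : (pvCellsOf q).Nodup := by
  rw [pvCellsOf, List.nodup_flatMap]
  constructor
  · intro r _
    refine List.Nodup.map ?_ (PySem.List.nodup_pyRange_one _ _)
    intro a b hab
    simpa using congrArg Prod.snd hab
  · refine (PySem.List.pairwise_lt_pyRange_one _ _).imp ?_
    intro r r' hrr x hx hx'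
    simp only [List.mem_map] at hx hx'
    obtain ⟨c, _, hc⟩ := hx
    obtain ⟨c', _, hc'⟩ := hx'
    have := (congrArg Prod.fst hc).trans (congrArg Prod.fst hc').symm
    simp at this
    omega

lemma pvCellsOf_length (q : Int × Int × Int × Int) :
    (pvCellsOf q).length = (q.2.1 - q.1).toNat * (q.2.2.2 - q.2.2.1).toNat := by
  rw [pvCellsOf, List.length_flatMap]
  have : ∀ r : Int, (((PySem.List.pyRange q.2.2.1 q.2.2.2 1).map fun c => (r, c)).length)
      = (q.2.2.2 - q.2.2.1).toNat := by
    intro r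
    simp [PySem.List.length_pyRange_one]
  simp only [this]
  rw [List.map_const', List.sum_replicate, smul_eq_mul, PySem.List.length_pyRange_one]

lemma pvCells_length (rects : List (Int × Int × Int × Int)) :
    ((pvCells rects).length : Int)
      = (rects.map fun q => max (q.2.1 - q.1) 0 * max (q.2.2.2 - q.2.2.1) 0).sum := by
  induction rects with
  | nil => simp [pvCells]
  | cons q rs ih =>
    have : pvCells (q :: rs) = pvCellsOf q ++ pvCells rs := by simp [pvCells]
    rw [this]
    simp only [List.length_append, List.map_cons, List.sum_cons]
    push_cast
    rw [pvCellsOf_length, ih]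
    push_cast
    rw [Int.toNat_eq_max, Int.toNat_eq_max]

lemma pvIntersects_iff (a b : Int × Int × Int × Int) :
    pvIntersects a b = true ↔ ∃ p, pvInRect a p ∧ pvInRect b p := by
  simp only [pvIntersects, Bool.and_eq_true, decide_eq_true_eq, pvInRect]
  constructor
  · rintro ⟨h1, h2⟩
    exact ⟨(max a.1 b.1, max a.2.2.1 b.2.2.1), by simp; omega, by simp; omega⟩
  · rintro ⟨p, ⟨a1, a2, a3, a4⟩, b1, b2, b3, b4⟩
    constructor <;> [skip; skip] <;> simp <;> omega

-- every rectangle's column interval lies inside [0, w)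
def pvColsOK (w : Int) (rects : List (Int × Int × Int × Int)) : Prop :=
  ∀ q ∈ rects, 0 ≤ q.2.2.1 ∧ q.2.2.2 ≤ w

lemma pvRepl (w : Int) :
    List.replicate w.toNat true = (PySem.List.pyRange 0 w 1).map (fun _ => true) := by
  rw [List.map_const', PySem.List.length_pyRange_one]
  congr 1
  omega

lemma pvApplyIv_map (w : Int) (f : Int → Bool) (iv : Int × Int)
    (h0 : 0 ≤ iv.1) (h1 : iv.2 ≤ w) :
    pvApplyIv ((PySem.List.pyRange 0 w 1).map f) iv
      = (PySem.List.pyRange 0 w 1).map (fun c => if iv.1 ≤ c ∧ c < iv.2 then false else f c) := by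
  unfold pvApplyIv
  by_cases hlt : iv.1 < iv.2
  · rw [if_pos hlt]
    apply List.ext_getElem
    · simp [PySem.List.length_pyRange_one]
      omega
    intro k hk1 hk2
    have hkw : (k : Int) < w := by
      have := hk2
      simp [PySem.List.length_pyRange_one] at this
      omega
    have hlen : ((PySem.List.pyRange 0 w 1).map f).length = w.toNat := by
      simp [PySem.List.length_pyRange_one]
    have hta : (List.take iv.1.toNat ((PySem.List.pyRange 0 w 1).map f)).length = iv.1.toNat := by
      rw [List.length_take, hlen]
      omega
    rw [List.getElem_append]
    split_ifs with ha
    · rw [List.getElem_append]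
      split_ifs with hb
      · have hk : k < iv.1.toNat := by rwa [hta] at hb
        rw [List.getElem_take, List.getElem_map, PySem.List.getElem_pyRange_one,
          List.getElem_map, PySem.List.getElem_pyRange_one]
        rw [if_neg (by omega)]
      · have hk : iv.1.toNat ≤ k ∧ k < iv.1.toNat + (iv.2 - iv.1).toNat := by
          rw [List.length_append, hta, List.length_replicate] at ha
          rw [hta] at hb
          omega
        rw [List.getElem_replicate, List.getElem_map, PySem.List.getElem_pyRange_one]
        rw [if_pos (by constructor <;> omega)]
    · have hk : iv.1.toNat + (iv.2 - iv.1).toNat ≤ k := by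
        rw [List.length_append, hta, List.length_replicate] at ha
        omega
      rw [List.getElem_drop, List.getElem_map, List.getElem_map,
        PySem.List.getElem_pyRange_one, PySem.List.getElem_pyRange_one]
      rw [List.length_append, hta, List.length_replicate]
      rw [if_neg (by omega)]
      congr 1
      omega
  · rw [if_neg hlt]
    apply List.map_congr_left
    intro c _
    rw [if_neg (by omega)]

lemma pvFold_iv (w : Int) (cover : List (Int × Int)) (f : Int → Bool)
    (hok : ∀ iv ∈ cover, 0 ≤ iv.1 ∧ iv.2 ≤ w) :
    cover.foldl pvApplyIv ((PySem.List.pyRange 0 w 1).map f)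
      = (PySem.List.pyRange 0 w 1).map
          (fun c => if cover.any (fun i => decide (i.1 ≤ c ∧ c < i.2)) then false else f c) := by
  induction cover generalizing f with
  | nil => simp
  | cons iv ivs ih =>
    rw [List.foldl_cons,
      pvApplyIv_map w f iv (hok iv List.mem_cons_self).1 (hok iv List.mem_cons_self).2,
      ih _ (fun i hi => hok i (List.mem_cons_of_mem _ hi))]
    apply List.map_congr_left
    intro c _
    by_cases h1 : iv.1 ≤ c ∧ c < iv.2
    · simp [List.any_cons, h1]
    · simp [List.any_cons, h1]

lemma pvRowB_eq (w : Int) (rects : List (Int × Int × Int × Int)) (r : Int)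
    (hok : pvColsOK w rects) :
    pvRowB w rects r
      = (PySem.List.pyRange 0 w 1).map (fun c => !((pvCells rects).contains (r, c))) := by
  unfold pvRowB
  have hcell : ∀ c : Int,
      (((rects.filter fun q => decide (q.1 ≤ r ∧ r < q.2.1)).map
          fun q => (q.2.2.1, q.2.2.2)).any fun i => decide (i.1 ≤ c ∧ c < i.2))
        = (pvCells rects).contains (r, c) := by
    intro c
    rw [Bool.eq_iff_iff]
    simp only [List.any_eq_true, List.mem_map, List.mem_filter, decide_eq_true_eq,
      List.contains_eq_mem, mem_pvCells, pvInRect]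
    constructor
    · rintro ⟨i, ⟨q, ⟨hq, hr1, hr2⟩, rfl⟩, hc1, hc2⟩
      exact ⟨q, hq, hr1, hr2, hc1, hc2⟩
    · rintro ⟨q, hq, h1, h2, h3, h4⟩
      exact ⟨(q.2.2.1, q.2.2.2), ⟨q, ⟨hq, h1, h2⟩, rfl⟩, h3, h4⟩
  by_cases hemp : ((rects.filter fun q => decide (q.1 ≤ r ∧ r < q.2.1)).map
      fun q => (q.2.2.1, q.2.2.2)).isEmpty
  · rw [if_pos hemp, pvRepl]
    apply List.map_congr_left
    intro c _
    rw [List.isEmpty_iff] at hemp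
    have hf : (pvCells rects).contains (r, c) = false := by
      rw [← hcell c, hemp]
      rfl
    rw [hf]
    rfl
  · rw [if_neg hemp, pvRepl, pvFold_iv w _ _ ?_]
    · apply List.map_congr_left
      intro c _
      rw [hcell c]
      cases hco : (pvCells rects).contains (r, c) <;> simp
    · intro iv hiv
      simp only [List.mem_map, List.mem_filter, decide_eq_true_eq] at hiv
      obtain ⟨q, ⟨hq, -⟩, rfl⟩ := hiv
      exact hok q hq

-- the common per-notch step, abstracted over A's traversal list L and B's rectangle
lemma pvStep (w h : Int) (rects : List (Int × Int × Int × Int))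
    (hnd : (pvCells rects).Nodup) (L : List (Int × Int)) (rect : Int × Int × Int × Int)
    (hmem : ∀ p, p ∈ L ↔ pvInRect rect p) (hLnd : L.Nodup)
    (hinR : ∀ p ∈ L, pvInR w h p) (hlen : L.length = (pvCellsOf rect).length) :
    (L.foldl (fun acc p => pvCellA acc p.1 p.2)
        (some (pvMaskOf w h (pvCells rects), ((pvCells rects).length : Int)))
      = Option.map (fun rs => (pvMaskOf w h (pvCells rs), ((pvCells rs).length : Int)))
          (if rects.any (fun q => pvIntersects rect q) then none else some (rects ++ [rect])))
    ∧ ((rects.any (fun q => pvIntersects rect q)) = false → (pvCells (rects ++ [rect])).Nodup) := by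
  rw [pvFold_cells w h L (pvCells rects) hnd hinR]
  have hce : pvCells (rects ++ [rect]) = pvCells rects ++ pvCellsOf rect := by
    simp [pvCells]
  have hdisj_iff : (∀ p, p ∈ pvCells rects → p ∈ L → False) ↔
      rects.any (fun q => pvIntersects rect q) = false := by
    constructor
    · intro hd
      rw [Bool.eq_false_iff]
      intro hany
      rw [List.any_eq_true] at hany
      obtain ⟨q, hq, hint⟩ := hany
      obtain ⟨p, hp1, hp2⟩ := (pvIntersects_iff rect q).mp hint
      exact hd p ((mem_pvCells rects p).mpr ⟨q, hq, hp2⟩) ((hmem p).mpr hp1)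
    · intro hfalse p hp hpL
      rw [mem_pvCells] at hp
      obtain ⟨q, hq, hqa⟩ := hp
      have hra : pvInRect rect p := (hmem p).mp hpL
      have : rects.any (fun q => pvIntersects rect q) = true := by
        rw [List.any_eq_true]
        exact ⟨q, hq, (pvIntersects_iff rect q).mpr ⟨p, hra, hqa⟩⟩
      rw [hfalse] at this
      exact Bool.false_ne_true this
  by_cases hany : rects.any (fun q => pvIntersects rect q) = true
  · have hnotnd : ¬ (pvCells rects ++ L).Nodup := by
      rw [List.nodup_append]
      rintro ⟨-, -, hd⟩
      have : rects.any (fun q => pvIntersects rect q) = false :=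
        hdisj_iff.mp (fun a ha hb => hd a ha a hb rfl)
      rw [hany] at this
      exact Bool.true_eq_false.mp this
    rw [if_neg hnotnd, if_pos hany]
    exact ⟨rfl, fun hf => absurd hany (by simp [hf])⟩
  · have hfalse : rects.any (fun q => pvIntersects rect q) = false := by
      simpa using hany
    have hdisj : ∀ p, p ∈ pvCells rects → p ∈ L → False := hdisj_iff.mpr hfalse
    have hnd2 : (pvCells rects ++ L).Nodup := by
      rw [List.nodup_append]
      refine ⟨hnd, hLnd, ?_⟩
      intro a ha b hb hab
      subst hab
      exact hdisj a ha hb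
    have hmemeq : ∀ p, p ∈ pvCells rects ++ L ↔ p ∈ pvCells (rects ++ [rect]) := by
      intro p
      rw [hce]
      simp only [List.mem_append, hmem, mem_pvCellsOf]
    have hndnew : (pvCells (rects ++ [rect])).Nodup := by
      rw [hce, List.nodup_append]
      refine ⟨hnd, pvCellsOf_nodup rect, ?_⟩
      intro a ha b hb hab
      subst hab
      exact hdisj a ha ((hmem a).mpr ((mem_pvCellsOf rect a).mp hb))
    rw [if_pos hnd2, if_neg (by simp [hfalse])]
    refine ⟨?_, fun _ => hndnew⟩
    simp only [Option.map_some, Option.some.injEq, Prod.mk.injEq]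
    refine ⟨pvMaskOf_congr w h _ _ hmemeq, ?_⟩
    rw [hce]
    simp only [List.length_append, hlen]

-- membership / nodup / range facts about A's traversal lists
lemma pvCellsTB_nodup (ori : String) (h depth len start : Int) :
    (pvCellsTB ori h depth len start).Nodup := by
  rw [pvCellsTB, List.nodup_flatMap]
  constructor
  · intro o _
    refine List.Nodup.map ?_ (PySem.List.nodup_pyRange_one 0 len)
    intro a b hab
    simpa using congrArg Prod.snd hab
  · refine (PySem.List.pairwise_lt_pyRange_one 0 depth).imp ?_
    intro o o' hoo x hx hx'
    simp only [List.mem_map] at hx hx'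
    obtain ⟨c, _, hc⟩ := hx
    obtain ⟨c', _, hc'⟩ := hx'
    have := (congrArg Prod.fst hc).trans (congrArg Prod.fst hc').symm
    by_cases htop : ori == "top" <;> simp [htop] at this <;> omega

lemma pvCellsLR_nodup (ori : String) (w depth len start : Int) :
    (pvCellsLR ori w depth len start).Nodup := by
  rw [pvCellsLR, List.nodup_flatMap]
  constructor
  · intro o _
    refine List.Nodup.map ?_ (PySem.List.nodup_pyRange_one 0 len)
    intro a b hab
    simpa using congrArg Prod.fst hab
  · refine (PySem.List.pairwise_lt_pyRange_one 0 depth).imp ?_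
    intro o o' hoo x hx hx'
    simp only [List.mem_map] at hx hx'
    obtain ⟨c, _, hc⟩ := hx
    obtain ⟨c', _, hc'⟩ := hx'
    have := (congrArg Prod.snd hc).trans (congrArg Prod.snd hc').symm
    by_cases hleft : ori == "left" <;> simp [hleft] at this <;> omega

lemma pvCellsTB_length (ori : String) (h depth len start : Int) :
    (pvCellsTB ori h depth len start).length = depth.toNat * len.toNat := by
  rw [pvCellsTB, List.length_flatMap]
  have : ∀ o : Int, (((PySem.List.pyRange 0 len 1).map fun col =>
      ((if ori == "top" then o else h - 1 - o), start + col)).length) = len.toNat := by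
    intro o
    simp [PySem.List.length_pyRange_one]
  simp only [this]
  rw [List.map_const', List.sum_replicate, smul_eq_mul, PySem.List.length_pyRange_one]
  simp

lemma pvCellsLR_length (ori : String) (w depth len start : Int) :
    (pvCellsLR ori w depth len start).length = depth.toNat * len.toNat := by
  rw [pvCellsLR, List.length_flatMap]
  have : ∀ o : Int, (((PySem.List.pyRange 0 len 1).map fun row =>
      (start + row, (if ori == "left" then o else w - 1 - o))).length) = len.toNat := by
    intro o
    simp [PySem.List.length_pyRange_one]
  simp only [this]
  rw [List.map_const', List.sum_replicate, smul_eq_mul, PySem.List.length_pyRange_one]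
  simp

lemma pvCellsTB_inR (w h : Int) (ori : String) (depth len start : Int)
    (hdep : depth ≤ h) (hst : 0 ≤ start) (hsl : start + len ≤ w) :
    ∀ p ∈ pvCellsTB ori h depth len start, pvInR w h p := by
  intro p hp
  simp only [pvCellsTB, List.mem_flatMap, List.mem_map, PySem.List.mem_pyRange_one] at hp
  obtain ⟨o, ho, col, hcol, hpe⟩ := hp
  subst hpe
  by_cases htop : ori == "top" <;> simp [pvInR, htop] <;> omega

lemma pvCellsLR_inR (w h : Int) (ori : String) (depth len start : Int)
    (hdep : depth ≤ w) (hst : 0 ≤ start) (hsl : start + len ≤ h) :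
    ∀ p ∈ pvCellsLR ori w depth len start, pvInR w h p := by
  intro p hp
  simp only [pvCellsLR, List.mem_flatMap, List.mem_map, PySem.List.mem_pyRange_one] at hp
  obtain ⟨o, ho, row, hrow, hpe⟩ := hp
  subst hpe
  by_cases hleft : ori == "left" <;> simp [pvInR, hleft] <;> omega

lemma pvCellsTB_mem_top (h depth len start : Int) (p : Int × Int) :
    p ∈ pvCellsTB "top" h depth len start ↔ pvInRect (0, depth, start, start + len) p := by
  obtain ⟨pr, pc⟩ := p
  simp only [pvCellsTB, List.mem_flatMap, List.mem_map, PySem.List.mem_pyRange_one,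
    Prod.mk.injEq, pvInRect, beq_self_eq_true, if_true]
  constructor
  · rintro ⟨o, ho, col, hcol, rfl, rfl⟩
    omega
  · rintro ⟨h1, h2, h3, h4⟩
    exact ⟨pr, by omega, pc - start, by omega, rfl, by omega⟩

lemma pvCellsTB_mem_bot (ori : String) (hno : ¬ (ori == "top") = true)
    (h depth len start : Int) (p : Int × Int) :
    p ∈ pvCellsTB ori h depth len start ↔ pvInRect (h - depth, h, start, start + len) p := by
  obtain ⟨pr, pc⟩ := p
  simp only [pvCellsTB, List.mem_flatMap, List.mem_map, PySem.List.mem_pyRange_one,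
    Prod.mk.injEq, pvInRect, if_neg hno]
  constructor
  · rintro ⟨o, ho, col, hcol, rfl, rfl⟩
    omega
  · rintro ⟨h1, h2, h3, h4⟩
    exact ⟨h - 1 - pr, by omega, pc - start, by omega, by omega, by omega⟩

lemma pvCellsLR_mem_left (w depth len start : Int) (p : Int × Int) :
    p ∈ pvCellsLR "left" w depth len start ↔ pvInRect (start, start + len, 0, depth) p := by
  obtain ⟨pr, pc⟩ := p
  simp only [pvCellsLR, List.mem_flatMap, List.mem_map, PySem.List.mem_pyRange_one,
    Prod.mk.injEq, pvInRect, beq_self_eq_true, if_true]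
  constructor
  · rintro ⟨o, ho, row, hrow, rfl, rfl⟩
    omega
  · rintro ⟨h1, h2, h3, h4⟩
    exact ⟨pc, by omega, pr - start, by omega, by omega, rfl⟩

lemma pvCellsLR_mem_right (ori : String) (hno : ¬ (ori == "left") = true)
    (w depth len start : Int) (p : Int × Int) :
    p ∈ pvCellsLR ori w depth len start ↔ pvInRect (start, start + len, w - depth, w) p := by
  obtain ⟨pr, pc⟩ := p
  simp only [pvCellsLR, List.mem_flatMap, List.mem_map, PySem.List.mem_pyRange_one,
    Prod.mk.injEq, pvInRect, if_neg hno]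
  constructor
  · rintro ⟨o, ho, row, hrow, rfl, rfl⟩
    omega
  · rintro ⟨h1, h2, h3, h4⟩
    exact ⟨w - 1 - pc, by omega, pr - start, by omega, by omega, by omega⟩

lemma pvNotch_bridge (w h : Int) (n : String × Int × Int × Int)
    (rects : List (Int × Int × Int × Int)) (hnd : (pvCells rects).Nodup)
    (hok : pvColsOK w rects) :
    pvNotchA w h (some (pvMaskOf w h (pvCells rects), ((pvCells rects).length : Int))) n
      = Option.map (fun rs => (pvMaskOf w h (pvCells rs), ((pvCells rs).length : Int)))
          (pvNotchB w h (some rects) n)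
    ∧ ∀ rs, pvNotchB w h (some rects) n = some rs →
        (pvCells rs).Nodup ∧ pvColsOK w rs := by
  obtain ⟨ori, depth, len, start⟩ := n
  simp only [pvNotchA, pvNotchB, pvRectOf]
  by_cases hori : (ori == "top" || ori == "bottom") = true
  · rw [if_pos hori, if_pos hori]
    by_cases hb1 : (decide (depth > h) || decide (len > w)) = true
    · simp [hb1]
    · rw [if_neg hb1, if_neg hb1]
      by_cases hb2 : (decide (start < 0) || decide (start + len > w)) = true
      · simp [hb2]
      · rw [if_neg hb2, if_neg hb2]
        simp only [Bool.or_eq_true, decide_eq_true_eq, not_or, not_lt] at hb1 hb2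
        have hfold : ((PySem.List.pyRange 0 depth 1).foldl (fun acc offset =>
            (PySem.List.pyRange 0 len 1).foldl (fun acc2 col =>
              pvCellA acc2 (if ori == "top" then offset else h - 1 - offset) (start + col)) acc)
            (some (pvMaskOf w h (pvCells rects), ((pvCells rects).length : Int))))
            = (pvCellsTB ori h depth len start).foldl (fun acc p => pvCellA acc p.1 p.2)
                (some (pvMaskOf w h (pvCells rects), ((pvCells rects).length : Int))) := by
          simp [pvCellsTB, List.foldl_flatMap, List.foldl_map]
        rw [hfold]
        by_cases htop : (ori == "top") = true
    -- rect for top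
        · rw [if_pos htop]
          have hlen : (pvCellsTB ori h depth len start).length
              = (pvCellsOf (0, depth, start, start + len)).length := by
            simp only [pvCellsTB_length, pvCellsOf_length]
            congr 1 <;> omega
          obtain ⟨h1, h2⟩ := pvStep w h rects hnd (pvCellsTB ori h depth len start)
            (0, depth, start, start + len)
            (by intro p; rw [show ori = "top" by simpa using htop]; exact pvCellsTB_mem_top h depth len start p)
            (pvCellsTB_nodup ori h depth len start)
            (pvCellsTB_inR w h ori depth len start hb1.1 hb2.1 hb2.2) hlen
          refine ⟨h1, ?_⟩
          intro rs hrs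
          dsimp only at hrs
          split_ifs at hrs with hg
          all_goals cases hrs
          all_goals refine ⟨h2 (by simpa using hg), ?_⟩
          all_goals intro q hq
          all_goals rcases List.mem_append.mp hq with hq | hq
          all_goals try exact hok q hq
          all_goals simp only [List.mem_singleton] at hq
          all_goals subst hq
          all_goals constructor
          all_goals dsimp only
          all_goals omega
        · rw [if_neg htop]
          have hlen : (pvCellsTB ori h depth len start).length
              = (pvCellsOf (h - depth, h, start, start + len)).length := by
            simp only [pvCellsTB_length, pvCellsOf_length]
            congr 1 <;> omega
          obtain ⟨h1, h2⟩ := pvStep w h rects hnd (pvCellsTB ori h depth len start)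
            (h - depth, h, start, start + len)
            (pvCellsTB_mem_bot ori htop h depth len start)
            (pvCellsTB_nodup ori h depth len start)
            (pvCellsTB_inR w h ori depth len start hb1.1 hb2.1 hb2.2) hlen
          refine ⟨h1, ?_⟩
          intro rs hrs
          dsimp only at hrs
          split_ifs at hrs with hg
          all_goals cases hrs
          all_goals refine ⟨h2 (by simpa using hg), ?_⟩
          all_goals intro q hq
          all_goals rcases List.mem_append.mp hq with hq | hq
          all_goals try exact hok q hq
          all_goals simp only [List.mem_singleton] at hq
          all_goals subst hq
          all_goals constructor
          all_goals dsimp only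
          all_goals omega
  · rw [if_neg hori, if_neg hori]
    by_cases hb1 : (decide (depth > w) || decide (len > h)) = true
    · simp [hb1]
    · rw [if_neg hb1, if_neg hb1]
      by_cases hb2 : (decide (start < 0) || decide (start + len > h)) = true
      · simp [hb2]
      · rw [if_neg hb2, if_neg hb2]
        simp only [Bool.or_eq_true, decide_eq_true_eq, not_or, not_lt] at hb1 hb2
        have hfold : ((PySem.List.pyRange 0 depth 1).foldl (fun acc offset =>
            (PySem.List.pyRange 0 len 1).foldl (fun acc2 row =>
              pvCellA acc2 (start + row) (if ori == "left" then offset else w - 1 - offset)) acc)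
            (some (pvMaskOf w h (pvCells rects), ((pvCells rects).length : Int))))
            = (pvCellsLR ori w depth len start).foldl (fun acc p => pvCellA acc p.1 p.2)
                (some (pvMaskOf w h (pvCells rects), ((pvCells rects).length : Int))) := by
          simp [pvCellsLR, List.foldl_flatMap, List.foldl_map]
        rw [hfold]
        by_cases hleft : (ori == "left") = true
        · rw [if_pos hleft]
          have hlen : (pvCellsLR ori w depth len start).length
              = (pvCellsOf (start, start + len, 0, depth)).length := by
            simp only [pvCellsLR_length, pvCellsOf_length]
            rw [Nat.mul_comm]
            congr 1 <;> omega
          obtain ⟨h1, h2⟩ := pvStep w h rects hnd (pvCellsLR ori w depth len start)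
            (start, start + len, 0, depth)
            (by intro p; rw [show ori = "left" by simpa using hleft]; exact pvCellsLR_mem_left w depth len start p)
            (pvCellsLR_nodup ori w depth len start)
            (pvCellsLR_inR w h ori depth len start hb1.1 hb2.1 hb2.2) hlen
          refine ⟨h1, ?_⟩
          intro rs hrs
          dsimp only at hrs
          split_ifs at hrs with hg
          all_goals cases hrs
          all_goals refine ⟨h2 (by simpa using hg), ?_⟩
          all_goals intro q hq
          all_goals rcases List.mem_append.mp hq with hq | hq
          all_goals try exact hok q hq
          all_goals simp only [List.mem_singleton] at hq
          all_goals subst hq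
          all_goals constructor
          all_goals dsimp only
          all_goals omega
        · rw [if_neg hleft]
          have hlen : (pvCellsLR ori w depth len start).length
              = (pvCellsOf (start, start + len, w - depth, w)).length := by
            simp only [pvCellsLR_length, pvCellsOf_length]
            rw [Nat.mul_comm]
            congr 1 <;> omega
          obtain ⟨h1, h2⟩ := pvStep w h rects hnd (pvCellsLR ori w depth len start)
            (start, start + len, w - depth, w)
            (pvCellsLR_mem_right ori hleft w depth len start)
            (pvCellsLR_nodup ori w depth len start)
            (pvCellsLR_inR w h ori depth len start hb1.1 hb2.1 hb2.2) hlen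
          refine ⟨h1, ?_⟩
          intro rs hrs
          dsimp only at hrs
          split_ifs at hrs with hg
          all_goals cases hrs
          all_goals refine ⟨h2 (by simpa using hg), ?_⟩
          all_goals intro q hq
          all_goals rcases List.mem_append.mp hq with hq | hq
          all_goals try exact hok q hq
          all_goals simp only [List.mem_singleton] at hq
          all_goals subst hq
          all_goals constructor
          all_goals dsimp only
          all_goals omega

lemma pvFoldA_none (w h : Int) (ns : List (String × Int × Int × Int)) :
    ns.foldl (pvNotchA w h) none = none := by
  induction ns with
  | nil => rfl
  | cons m ms ih => simpa [pvNotchA] using ih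

lemma pvFoldB_none (w h : Int) (ns : List (String × Int × Int × Int)) :
    ns.foldl (pvNotchB w h) none = none := by
  induction ns with
  | nil => rfl
  | cons m ms ih => simpa [pvNotchB] using ih

lemma pvLoop (w h : Int) (notches : List (String × Int × Int × Int))
    (rects : List (Int × Int × Int × Int)) (hnd : (pvCells rects).Nodup)
    (hok : pvColsOK w rects) :
    (notches.foldl (pvNotchA w h)
        (some (pvMaskOf w h (pvCells rects), ((pvCells rects).length : Int)))
      = Option.map (fun rs => (pvMaskOf w h (pvCells rs), ((pvCells rs).length : Int)))
          (notches.foldl (pvNotchB w h) (some rects)))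
    ∧ ∀ rs, notches.foldl (pvNotchB w h) (some rects) = some rs → pvColsOK w rs := by
  induction notches generalizing rects with
  | nil =>
    refine ⟨rfl, ?_⟩
    intro rs hrs
    cases hrs
    exact hok
  | cons n ns ih =>
    obtain ⟨h1, h2⟩ := pvNotch_bridge w h n rects hnd hok
    cases hb : pvNotchB w h (some rects) n with
    | none =>
      have hA : pvNotchA w h (some (pvMaskOf w h (pvCells rects), ((pvCells rects).length : Int))) n = none := by
        rw [h1, hb]; rfl
      refine ⟨?_, ?_⟩
      · simp only [List.foldl_cons, hA, hb, pvFoldA_none, pvFoldB_none, Option.map_none]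
      · intro rs hrs
        rw [List.foldl_cons, hb, pvFoldB_none] at hrs
        cases hrs
    | some rs =>
      obtain ⟨hnd', hok'⟩ := h2 rs hb
      have hA : pvNotchA w h (some (pvMaskOf w h (pvCells rects), ((pvCells rects).length : Int))) n
          = some (pvMaskOf w h (pvCells rs), ((pvCells rs).length : Int)) := by rw [h1, hb]; rfl
      obtain ⟨ih1, ih2⟩ := ih rs hnd' hok'
      refine ⟨?_, ?_⟩
      · simp only [List.foldl_cons, hA, hb]
        exact ih1
      · intro rs' hrs'
        rw [List.foldl_cons, hb] at hrs'
        exact ih2 rs' hrs'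

-- ===== VERDICT (by name: the statement is the Claim_ definition above) =====
theorem render_mask_from_notches_py_spec : Claim_equal_render_mask_from_notches_py := by
  intro w h notches _
  unfold Spec_render_mask_from_notches_py
  unfold render_mask_from_notches_py render_mask_from_notches_py_alt
  obtain ⟨h0, hoks⟩ := pvLoop w h notches [] List.nodup_nil
    (fun q hq => absurd hq List.not_mem_nil)
  rw [show pvCells ([] : List (Int × Int × Int × Int)) = [] from rfl] at h0
  simp only [List.length_nil, Nat.cast_zero, pvMaskOf_nil] at h0
  simp only [h0]
  cases hres : notches.foldl (pvNotchB w h) (some []) with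
  | none => rfl
  | some rects =>
    simp only [Option.map_some]
    refine congrArg some ?_
    refine Prod.ext ?_ (pvCells_length rects)
    have hok := hoks rects hres
    unfold pvMaskOf
    apply List.map_congr_left
    intro r _
    exact (pvRowB_eq w rects r hok).symm
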